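-- pv_equiv track=rewrite | github.com/alexsfking/python_exercises | hackerrank/exercises/ice_cream_parlor.py | get_indices
-- ===== SOURCE A (Python) =====
-- def get_indices(arr:list,value_i,value_j)->list:
--     out=[]
--     out.append(arr.index(value_i))
--     try:
--         out.append(arr.index(value_j,out[0]+1))
--     except:
--         out.append(arr.index(value_j,0,out[0]))
--     for i in range(0,len(out)):
--         out[i]+=1
--     out.sort()
--     return out
-- ===== SOURCE B (Python) =====
-- def get_indices(arr: list, value_i, value_j) -> list:
--     # One pass: record the first index of value_i and every index of value_j,
--     # then pick value_j's first index after pos_i, falling back to one before it.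
--     pos_i = None
--     pos_j = []
--     for k, v in enumerate(arr):
--         if pos_i is None and v == value_i:
--             pos_i = k
--         if v == value_j:
--             pos_j.append(k)
--     if pos_i is None:
--         raise ValueError(f"{value_i!r} is not in list")
--     candidates = [k for k in pos_j if k > pos_i] or [k for k in pos_j if k < pos_i]
--     if not candidates:
--         raise ValueError(f"{value_j!r} is not in list")
--     return sorted([pos_i + 1, candidates[0] + 1])
-- ===== Notes on version B (the rewrite author's own statement) =====
-- stated objective: alternative
-- what changed: A performs up to three separate list.index scans (value_i, value_j after it, value_j before it); B makes a single pass over enumerate(arr) collecting the first index of value_i and all indices of value_j, then selects the first candidate index after (else before) value_i's index by filtering.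
import Mathlib
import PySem

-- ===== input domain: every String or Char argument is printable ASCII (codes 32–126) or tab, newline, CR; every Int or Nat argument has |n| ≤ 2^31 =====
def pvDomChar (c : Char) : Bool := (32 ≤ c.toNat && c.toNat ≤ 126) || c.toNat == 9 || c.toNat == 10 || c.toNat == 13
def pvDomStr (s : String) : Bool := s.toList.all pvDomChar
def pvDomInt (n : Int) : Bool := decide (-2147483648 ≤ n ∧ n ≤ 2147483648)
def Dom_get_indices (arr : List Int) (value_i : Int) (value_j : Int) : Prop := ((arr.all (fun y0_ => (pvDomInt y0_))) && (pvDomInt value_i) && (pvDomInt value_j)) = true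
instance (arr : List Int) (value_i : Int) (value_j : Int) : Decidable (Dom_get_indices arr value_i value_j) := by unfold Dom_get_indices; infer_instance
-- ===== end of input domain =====

-- B replaces A's three list.index scans by one pass that collects the first index of
-- value_i and all indices of value_j, then picks the first candidate after/before it
-- (objective: alternative decomposition; same asymptotic cost).

-- ===== PORT A =====
-- arr.index(value_j, i+1) is ported as index? on arr.drop (i+1) plus offset i+1, and
-- arr.index(value_j, 0, i) as index? on arr.take i: exact, since 0 ≤ i < len(arr) here,
-- so the start/stop arguments are in range and Python's clamping never fires.
-- Where the Python raises ValueError (value absent), the port returns [] (excluded by Pre_).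
def get_indices (arr : List Int) (value_i : Int) (value_j : Int) : List Int :=
  match PySem.List.index? arr value_i with
  | none => []  -- ValueError from arr.index(value_i); outside Pre_
  | some i =>
    let j : Option Int :=
      match PySem.List.index? (arr.drop (i + 1)) value_j with
      | some k => some ((i : Int) + 1 + (k : Int))
      | none => (PySem.List.index? (arr.take i) value_j).map (fun k => (k : Int))
    match j with
    | none => []  -- uncaught ValueError from the second arr.index; outside Pre_
    | some jv => PySem.List.sorted [(i : Int) + 1, jv + 1] (fun x => x) false

-- ===== PORT B =====
-- the loop body of B's single pass over enumerate(arr)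
def altStep (value_i value_j : Int) (s : Option Int × List Int) (kv : Int × Int) :
    Option Int × List Int :=
  ((match s.1 with
    | none => if kv.2 = value_i then some kv.1 else none
    | some v => some v),
   if kv.2 = value_j then s.2 ++ [kv.1] else s.2)

def get_indices_alt (arr : List Int) (value_i : Int) (value_j : Int) : List Int :=
  let st := (PySem.List.enumerate arr 0).foldl (altStep value_i value_j) (none, [])
  match st.1 with
  | none => []  -- raise ValueError; outside Pre_
  | some i =>
    let after := st.2.filter (fun k => i < k)
    let cands := if after = [] then st.2.filter (fun k => k < i) else after
    match cands with
    | [] => []  -- raise ValueError; outside Pre_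
    | c :: _ => PySem.List.sorted [i + 1, c + 1] (fun x => x) false

-- ===== PRECONDITION & SPEC =====
-- Pre_ excludes exactly the inputs on which the Python A raises ValueError: value_i must
-- occur, and value_j must occur at some index other than the first index of value_i.
def Pre_get_indices (arr : List Int) (value_i : Int) (value_j : Int) : Prop :=
  value_i ∈ arr ∧ (if value_i = value_j then 2 ≤ arr.count value_j else value_j ∈ arr)
instance (arr : List Int) (value_i : Int) (value_j : Int) : Decidable (Pre_get_indices arr value_i value_j) := by unfold Pre_get_indices; infer_instance

def pvWitness_get_indices : List Int × Int × Int := ([3, 1, 2], 1, 2)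

def Spec_get_indices (arr : List Int) (value_i : Int) (value_j : Int) (out : List Int) : Prop := out = get_indices_alt arr value_i value_j
instance (arr : List Int) (value_i : Int) (value_j : Int) (out : List Int) : Decidable (Spec_get_indices arr value_i value_j out) := by unfold Spec_get_indices; infer_instance

-- ===== CLAIM (what is proved, stated in full; the proofs are below) =====
def Claim_equal_get_indices : Prop := ∀ (arr : List Int) (value_i : Int) (value_j : Int), Dom_get_indices arr value_i value_j → Pre_get_indices arr value_i value_j → Spec_get_indices arr value_i value_j (get_indices arr value_i value_j)

-- ===== LEMMAS AND PROOFS =====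

-- the list of indices (offset s) at which v occurs in xs
def posJ (v : Int) : List Int → Int → List Int
  | [], _ => []
  | x :: xs, s => (if x = v then [s] else []) ++ posJ v xs (s + 1)

theorem posJ_head (v : Int) (xs : List Int) (s : Int) :
    (posJ v xs s).head? = (PySem.List.index? xs v).map (fun k => s + (k : Int)) := by
  induction xs generalizing s with
  | nil => simp [posJ, PySem.List.index?_eq_idxOf?]
  | cons x xs ih =>
    by_cases h : x = v
    · subst h
      rw [PySem.List.index?_cons_self]
      simp [posJ]
    · rw [PySem.List.index?_cons_of_ne xs h]
      simp only [posJ, if_neg h, List.nil_append, ih]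
      rcases PySem.List.index? xs v with _ | k <;> simp <;> omega

theorem posJ_append (v : Int) (xs ys : List Int) (s : Int) :
    posJ v (xs ++ ys) s = posJ v xs s ++ posJ v ys (s + xs.length) := by
  induction xs generalizing s with
  | nil => simp [posJ]
  | cons x xs ih =>
    simp only [List.cons_append, posJ, ih, List.length_cons, List.append_assoc]
    congr 2
    push_cast
    ring_nf

theorem posJ_mem (v : Int) (xs : List Int) (s : Int) :
    ∀ k ∈ posJ v xs s, s ≤ k ∧ k < s + xs.length := by
  induction xs generalizing s with
  | nil => simp [posJ]
  | cons x xs ih =>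
    intro k hk
    simp only [posJ, List.mem_append] at hk
    rcases hk with hk | hk
    · have hks : k = s := by split at hk <;> simp_all
      simp only [List.length_cons]
      push_cast
      omega
    · have := ih (s + 1) k hk
      simp only [List.length_cons]
      push_cast
      omega

theorem fold_spec (vi vj : Int) (xs : List Int) (s : Int) (o : Option Int) (l : List Int) :
    (PySem.List.enumerate xs s).foldl (altStep vi vj) (o, l) =
      ((match o with
        | some v => some v
        | none => (PySem.List.index? xs vi).map (fun k => s + (k : Int))),
       l ++ posJ vj xs s) := by
  induction xs generalizing s o l with
  | nil =>
    rcases o <;> simp [PySem.List.enumerate_nil, posJ, PySem.List.index?_eq_idxOf?]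
  | cons x xs ih =>
    rw [PySem.List.enumerate_cons, List.foldl_cons, ih]
    rcases o with _ | v
    · by_cases hvi : x = vi
      · subst hvi
        rw [PySem.List.index?_cons_self]
        by_cases hvj : x = vj <;>
          simp [altStep, hvj, posJ, List.append_assoc]
      · rw [PySem.List.index?_cons_of_ne xs hvi]
        by_cases hvj : x = vj
        · simp only [altStep, if_neg hvi, if_pos hvj, posJ, List.append_assoc, Prod.mk.injEq,
            List.nil_append]
          refine ⟨?_, trivial⟩
          rcases PySem.List.index? xs vi with _ | k <;> simp <;> omega
        · simp only [altStep, if_neg hvi, if_neg hvj, posJ, List.append_assoc, Prod.mk.injEq,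
            List.nil_append]
          refine ⟨?_, trivial⟩
          rcases PySem.List.index? xs vi with _ | k <;> simp <;> omega
    · by_cases hvj : x = vj <;> simp [altStep, hvj, posJ, List.append_assoc]

theorem get_indices_eq_alt (arr : List Int) (vi vj : Int) :
    get_indices arr vi vj = get_indices_alt arr vi vj := by
  unfold get_indices get_indices_alt
  rw [fold_spec]
  rcases hI : PySem.List.index? arr vi with _ | i
  · rfl
  · obtain ⟨hi, -, -⟩ := PySem.List.getElem_of_index?_eq_some hI
    have hlen1 : (arr.take (i + 1)).length = i + 1 := by
      rw [List.length_take]; omega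
    have hlen2 : (arr.take i).length = i := by
      rw [List.length_take]; omega
    have hafter : (posJ vj arr 0).filter (fun k => decide ((i : Int) < k)) =
        posJ vj (arr.drop (i + 1)) ((i : Int) + 1) := by
      conv_lhs => rw [(List.take_append_drop (i + 1) arr).symm, posJ_append, List.filter_append]
      rw [hlen1]
      rw [show ((0 : Int) + ((i + 1 : Nat) : Int)) = (i : Int) + 1 from by push_cast; ring]
      have h1 : (posJ vj (arr.take (i + 1)) 0).filter (fun k => decide ((i : Int) < k)) = [] := by
        rw [List.filter_eq_nil_iff]
        intro k hk
        have := posJ_mem vj _ 0 k hk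
        rw [hlen1] at this
        simp only [Bool.not_eq_true, decide_eq_false_iff_not, not_lt]
        push_cast at this ⊢
        omega
      have h2 : (posJ vj (arr.drop (i + 1)) ((i : Int) + 1)).filter
          (fun k => decide ((i : Int) < k)) = posJ vj (arr.drop (i + 1)) ((i : Int) + 1) := by
        rw [List.filter_eq_self]
        intro k hk
        have := posJ_mem vj _ _ k hk
        simp only [decide_eq_true_eq]
        omega
      rw [h1, h2, List.nil_append]
    have hbefore : (posJ vj arr 0).filter (fun k => decide (k < (i : Int))) =
        posJ vj (arr.take i) 0 := by
      conv_lhs => rw [(List.take_append_drop i arr).symm, posJ_append, List.filter_append]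
      rw [hlen2]
      have h1 : (posJ vj (arr.take i) 0).filter (fun k => decide (k < (i : Int))) =
          posJ vj (arr.take i) 0 := by
        rw [List.filter_eq_self]
        intro k hk
        have := posJ_mem vj _ 0 k hk
        rw [hlen2] at this
        simp only [decide_eq_true_eq]
        omega
      have h2 : (posJ vj (arr.drop i) ((0 : Int) + (i : Int))).filter
          (fun k => decide (k < (i : Int))) = [] := by
        rw [List.filter_eq_nil_iff]
        intro k hk
        have := posJ_mem vj _ _ k hk
        simp only [Bool.not_eq_true, decide_eq_false_iff_not, not_lt]
        omega
      rw [h1, h2, List.append_nil]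
    simp only [List.nil_append, Option.map_some, zero_add]
    rcases hA : PySem.List.index? (arr.drop (i + 1)) vj with _ | k
    · -- no occurrence strictly after i: the after-filter is empty, fall back to before
      have hae : (posJ vj arr 0).filter (fun k => decide ((i : Int) < k)) = [] := by
        rw [hafter, ← List.head?_eq_none_iff, posJ_head, hA]
        rfl
      rcases hB : PySem.List.index? (arr.take i) vj with _ | m
      · have hbe : (posJ vj arr 0).filter (fun k => decide (k < (i : Int))) = [] := by
          rw [hbefore, ← List.head?_eq_none_iff, posJ_head, hB]
          rfl
        simp [hae, hbe]
      · have hh : ((posJ vj arr 0).filter (fun k => decide (k < (i : Int)))).head? =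
            some ((m : Int)) := by
          rw [hbefore, posJ_head, hB]
          simp
        rcases hc : (posJ vj arr 0).filter (fun k => decide (k < (i : Int))) with _ | ⟨c, t⟩
        · rw [hc] at hh; simp at hh
        · rw [hc] at hh
          simp only [List.head?_cons, Option.some.injEq] at hh
          simp [hae, hc, hh]
    · -- first occurrence strictly after i found by arr.index(value_j, i+1)
      have hh : ((posJ vj arr 0).filter (fun k => decide ((i : Int) < k))).head? =
          some ((i : Int) + 1 + (k : Int)) := by
        rw [hafter, posJ_head, hA]
        simp
      rcases hc : (posJ vj arr 0).filter (fun k => decide ((i : Int) < k)) with _ | ⟨c, t⟩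
      · rw [hc] at hh; simp at hh
      · rw [hc] at hh
        simp only [List.head?_cons, Option.some.injEq] at hh
        simp [hc, hh]

-- ===== VERDICT (by name: the statement is the Claim_ definition above) =====
theorem get_indices_spec : Claim_equal_get_indices := by
  intro arr vi vj _ _
  unfold Spec_get_indices
  exact get_indices_eq_alt arr vi vj
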